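-- pv_equiv track=rewrite | github.com/Jazende/AdventOfCode | aoc23/14.py | roll_south
-- ===== SOURCE A (Python) =====
-- def roll_south(blocks, boulders, rows, cols):
--     # x[1] / row zo groot mogelijk
--     boulders.sort(key=lambda x: x[1], reverse=True)
--     new_boulders = []
--     for boulder in boulders:
--         col, row = boulder
--         while True:
--             if (col, row+1) in blocks or (col, row+1) in new_boulders or row == rows-1:
--                 new_boulders.append( (col, row) )
--                 break
--             row += 1
--     return new_boulders
-- ===== SOURCE B (Python) =====
-- def roll_south(blocks, boulders, rows, cols):
--     # Same in-place sort of `boulders` as the original (observable side effect).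
--     boulders.sort(key=lambda x: x[1], reverse=True)
--     settled = []
--     for col, row in boulders:
--         # First occupied row strictly below `row` in this column, capped at `rows`;
--         # the boulder comes to rest directly above it.
--         stop = rows
--         for c, r in blocks:
--             if c == col and row < r < stop:
--                 stop = r
--         for c, r in settled:
--             if c == col and row < r < stop:
--                 stop = r
--         settled.append((col, stop - 1))
--     return settled
-- ===== Notes on version B (the rewrite author's own statement) =====
-- stated objective: faster
-- what changed: Each boulder's resting row is computed directly as (first occupied row below it, capped at rows) - 1 by a single scan over blocks and already-settled boulders, instead of A's cell-by-cell while-loop descent with two list-membership tests per cell.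
-- outside the precondition, e.g. on roll_south({(0, 6)}, [(0, 5)], 3, 1): A returns [(0, 5)], B returns [(0, 2)]
import Mathlib
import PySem

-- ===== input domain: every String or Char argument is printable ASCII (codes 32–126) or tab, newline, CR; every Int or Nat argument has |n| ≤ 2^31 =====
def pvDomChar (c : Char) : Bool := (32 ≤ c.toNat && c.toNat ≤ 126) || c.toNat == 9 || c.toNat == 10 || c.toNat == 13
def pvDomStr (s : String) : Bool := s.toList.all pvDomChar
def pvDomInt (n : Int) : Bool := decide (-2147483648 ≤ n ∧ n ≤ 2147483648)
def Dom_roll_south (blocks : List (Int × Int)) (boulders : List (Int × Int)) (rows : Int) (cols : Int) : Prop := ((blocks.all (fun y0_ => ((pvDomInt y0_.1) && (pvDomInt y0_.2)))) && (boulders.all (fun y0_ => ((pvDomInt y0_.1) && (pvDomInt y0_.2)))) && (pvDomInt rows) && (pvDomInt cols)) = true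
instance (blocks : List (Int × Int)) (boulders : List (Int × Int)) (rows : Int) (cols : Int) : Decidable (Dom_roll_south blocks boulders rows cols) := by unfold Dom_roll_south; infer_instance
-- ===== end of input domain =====

-- B replaces A's cell-by-cell while-loop descent by a direct computation of each
-- boulder's resting row (first occupied row below it, capped at rows, minus one).
-- Both versions sort `boulders` in place in Python; the equivalence proved here is
-- about the return value.

-- ===== PORT A =====
-- A's inner `while True` loop: fuel-guarded recursion; fuel = (rows - row).toNat
-- suffices on every input admitted by Pre_ (row < rows).
def pvFall (blocks nb : List (Int × Int)) (col rows row : Int) (fuel : Nat) : Int :=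
  match fuel with
  | 0 => row
  | fuel + 1 =>
    if (col, row + 1) ∈ blocks ∨ (col, row + 1) ∈ nb ∨ row = rows - 1 then row
    else pvFall blocks nb col rows (row + 1) fuel

def roll_south (blocks : List (Int × Int)) (boulders : List (Int × Int)) (rows : Int) (cols : Int) : List (Int × Int) :=
  (PySem.List.sorted boulders (fun x => x.2) true).foldl
    (fun nb b => nb ++ [(b.1, pvFall blocks nb b.1 rows b.2 (rows - b.2).toNat)]) []

-- ===== PORT B =====
-- B's inner `for` scans: running minimum of occupied rows in (row, stop).
def pvStopScan (col row : Int) (xs : List (Int × Int)) (s : Int) : Int :=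
  xs.foldl (fun s p => if p.1 = col ∧ row < p.2 ∧ p.2 < s then p.2 else s) s

def roll_south_alt (blocks : List (Int × Int)) (boulders : List (Int × Int)) (rows : Int) (cols : Int) : List (Int × Int) :=
  (PySem.List.sorted boulders (fun x => x.2) true).foldl
    (fun settled b =>
      settled ++ [(b.1, pvStopScan b.1 b.2 settled (pvStopScan b.1 b.2 blocks rows) - 1)]) []

-- ===== PRECONDITION & SPEC =====
-- Pre_ excludes boulders starting at or below the grid floor (row ≥ rows): there A's
-- while loop runs forever unless a stray out-of-grid block happens to stop the boulder,
-- in which case A settles it below the floor.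
def Pre_roll_south (blocks : List (Int × Int)) (boulders : List (Int × Int)) (rows : Int) (cols : Int) : Prop :=
  ∀ p ∈ boulders, p.2 < rows
instance (blocks : List (Int × Int)) (boulders : List (Int × Int)) (rows : Int) (cols : Int) : Decidable (Pre_roll_south blocks boulders rows cols) := by unfold Pre_roll_south; infer_instance
def pvWitness_roll_south : (List (Int × Int)) × (List (Int × Int)) × Int × Int := ([(0, 1)], [(0, 0), (1, 0)], 3, 2)

def Spec_roll_south (blocks : List (Int × Int)) (boulders : List (Int × Int)) (rows : Int) (cols : Int) (out : List (Int × Int)) : Prop := out = roll_south_alt blocks boulders rows cols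
instance (blocks : List (Int × Int)) (boulders : List (Int × Int)) (rows : Int) (cols : Int) (out : List (Int × Int)) : Decidable (Spec_roll_south blocks boulders rows cols out) := by unfold Spec_roll_south; infer_instance

-- ===== CLAIM (what is proved, stated in full; the proofs are below) =====
def Claim_equal_roll_south : Prop := ∀ (blocks : List (Int × Int)) (boulders : List (Int × Int)) (rows : Int) (cols : Int), Dom_roll_south blocks boulders rows cols → Pre_roll_south blocks boulders rows cols → Spec_roll_south blocks boulders rows cols (roll_south blocks boulders rows cols)

-- ===== LEMMAS AND PROOFS =====

theorem pvWitness_ok : Dom_roll_south pvWitness_roll_south.1 pvWitness_roll_south.2.1 pvWitness_roll_south.2.2.1 pvWitness_roll_south.2.2.2 ∧ Pre_roll_south pvWitness_roll_south.1 pvWitness_roll_south.2.1 pvWitness_roll_south.2.2.1 pvWitness_roll_south.2.2.2 := by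
  constructor <;> decide

-- Characterisation of B's running-minimum scan.
theorem pvStopScan_props (col row : Int) (xs : List (Int × Int)) (s : Int) (hs : row < s) :
    row < pvStopScan col row xs s ∧ pvStopScan col row xs s ≤ s ∧
    (∀ p ∈ xs, p.1 = col → row < p.2 → pvStopScan col row xs s ≤ p.2) ∧
    (pvStopScan col row xs s = s ∨ ((col, pvStopScan col row xs s) ∈ xs)) := by
  induction xs generalizing s with
  | nil => simp [pvStopScan]; omega
  | cons p xs ih =>
    by_cases h : p.1 = col ∧ row < p.2 ∧ p.2 < s
    · have hrec := ih p.2 h.2.1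
      have heq : pvStopScan col row (p :: xs) s = pvStopScan col row xs p.2 := by
        simp only [pvStopScan, List.foldl_cons, if_pos h]
      refine ⟨by omega, by omega, ?_, ?_⟩
      · intro q hq hqc hqr
        rw [heq]
        rcases List.mem_cons.mp hq with hq | hq
        · subst hq; omega
        · exact hrec.2.2.1 q hq hqc hqr
      · rcases hrec.2.2.2 with h1 | h1
        · right; rw [heq, h1, ← h.1]; simp
        · right; rw [heq]; exact List.mem_cons_of_mem _ h1
    · have hrec := ih s hs
      have heq : pvStopScan col row (p :: xs) s = pvStopScan col row xs s := by
        simp only [pvStopScan, List.foldl_cons, if_neg h]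
      rw [heq]
      refine ⟨hrec.1, hrec.2.1, ?_, ?_⟩
      · intro q hq hqc hqr
        rcases List.mem_cons.mp hq with hq | hq
        · subst hq
          have : ¬ q.2 < s := fun hlt => h ⟨hqc, hqr, hlt⟩
          omega
        · exact hrec.2.2.1 q hq hqc hqr
      · rcases hrec.2.2.2 with h1 | h1
        · left; exact h1
        · right; exact List.mem_cons_of_mem _ h1

-- A's descent lands directly above the first occupied row below, capped at rows.
theorem pvFall_eq (blocks nb : List (Int × Int)) (col rows m : Int)
    (hm : m ≤ rows)
    (fuel : Nat) (row : Int)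
    (hfree : ∀ r, row < r → r < m → ¬((col, r) ∈ blocks ∨ (col, r) ∈ nb))
    (hhit : m = rows ∨ (col, m) ∈ blocks ∨ (col, m) ∈ nb)
    (hr : row < m) (hfuel : (m - row).toNat ≤ fuel) :
    pvFall blocks nb col rows row fuel = m - 1 := by
  induction fuel generalizing row with
  | zero => omega
  | succ fuel ih =>
    by_cases hstep : row + 1 = m
    · have hcond : (col, row + 1) ∈ blocks ∨ (col, row + 1) ∈ nb ∨ row = rows - 1 := by
        rcases hhit with h | h | h
        · right; right; omega
        · left; rw [hstep]; exact h
        · right; left; rw [hstep]; exact h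
      simp only [pvFall, if_pos hcond]
      omega
    · have hcond : ¬((col, row + 1) ∈ blocks ∨ (col, row + 1) ∈ nb ∨ row = rows - 1) := by
        rintro (h | h | h)
        · exact hfree (row + 1) (by omega) (by omega) (Or.inl h)
        · exact hfree (row + 1) (by omega) (by omega) (Or.inr h)
        · omega
      simp only [pvFall, if_neg hcond]
      exact ih (row + 1) (fun r h1 h2 => hfree r (by omega) h2) (by omega) (by omega)

theorem pvMainFold (blocks : List (Int × Int)) (rows : Int) :
    ∀ (l acc : List (Int × Int)), (∀ p ∈ l, p.2 < rows) →
    l.foldl (fun nb b => nb ++ [(b.1, pvFall blocks nb b.1 rows b.2 (rows - b.2).toNat)]) acc =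
    l.foldl (fun settled b => settled ++ [(b.1, pvStopScan b.1 b.2 settled (pvStopScan b.1 b.2 blocks rows) - 1)]) acc := by
  intro l
  induction l with
  | nil => intro acc _; rfl
  | cons b l ih =>
    intro acc hpre
    have hb : b.2 < rows := hpre b (List.mem_cons_self ..)
    simp only [List.foldl_cons]
    have hstep : pvFall blocks acc b.1 rows b.2 (rows - b.2).toNat =
        pvStopScan b.1 b.2 acc (pvStopScan b.1 b.2 blocks rows) - 1 := by
      obtain ⟨h1a, h1b, h1c, h1d⟩ := pvStopScan_props b.1 b.2 blocks rows hb
      obtain ⟨h2a, h2b, h2c, h2d⟩ := pvStopScan_props b.1 b.2 acc _ h1a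
      set m := pvStopScan b.1 b.2 acc (pvStopScan b.1 b.2 blocks rows) with hmdef
      apply pvFall_eq blocks acc b.1 rows m (by omega)
      · intro r hr1 hr2 hocc
        rcases hocc with hocc | hocc
        · have := h1c _ hocc rfl hr1
          omega
        · have := h2c _ hocc rfl hr1
          omega
      · rcases h2d with h | h
        · rcases h1d with h' | h'
          · left; omega
          · right; left; rw [h]; exact h'
        · right; right; exact h
      · exact h2a
      · omega
    rw [hstep]
    exact ih _ (fun p hp => hpre p (List.mem_cons_of_mem _ hp))

-- ===== VERDICT (by name: the statement is the Claim_ definition above) =====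
theorem roll_south_spec : Claim_equal_roll_south := by
  intro blocks boulders rows cols _ hpre
  unfold Spec_roll_south roll_south roll_south_alt
  apply pvMainFold
  intro p hp
  exact hpre p (((PySem.List.mem_sorted _ _ _ _).mp hp))
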